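-- pv_equiv track=rewrite | github.com/jack-thesparrow/tube-color-detect | modules/temp.py | merge_consecutive_segments
-- ===== SOURCE A (Python) =====
-- def merge_consecutive_segments(segments):
--     merged = []
--     for color, start, end in segments:
--         if merged and merged[-1][0] == color:
--             merged[-1] = (color, merged[-1][1], end)
--         else:
--             merged.append((color, start, end))
--     return merged
-- ===== SOURCE B (Python) =====
-- def merge_consecutive_segments(segments):
--     stack = segments[::-1]
--     result = []
--     while stack:
--         color, start, end = stack.pop()
--         while stack and stack[-1][0] == color:
--             _, _, end = stack.pop()
--         result.append((color, start, end))
--     return result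
-- ===== Notes on version B (the rewrite author's own statement) =====
-- stated objective: alternative
-- what changed: B reverses the input into an explicit stack and, per run, an inner loop pops all consecutive same-color segments before emitting one tuple per run, instead of A's single pass that repeatedly rewrites merged[-1] in place.
import Mathlib
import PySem

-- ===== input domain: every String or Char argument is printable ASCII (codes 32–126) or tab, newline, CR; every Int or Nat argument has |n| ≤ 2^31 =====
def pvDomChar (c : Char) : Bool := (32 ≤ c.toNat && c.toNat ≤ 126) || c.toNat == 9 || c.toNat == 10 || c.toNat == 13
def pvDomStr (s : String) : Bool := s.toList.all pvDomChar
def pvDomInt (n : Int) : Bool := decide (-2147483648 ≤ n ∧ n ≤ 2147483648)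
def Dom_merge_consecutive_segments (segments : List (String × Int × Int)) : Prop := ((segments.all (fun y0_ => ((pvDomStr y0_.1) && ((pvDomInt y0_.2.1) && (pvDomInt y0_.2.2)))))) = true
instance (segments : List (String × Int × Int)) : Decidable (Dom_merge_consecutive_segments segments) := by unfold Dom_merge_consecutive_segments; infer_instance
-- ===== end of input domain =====

-- B pops whole same-color runs off an explicit stack (the reversed input) in a nested
-- loop, emitting one tuple per run, instead of A's single pass rewriting merged[-1]:
-- genuinely different control structure, same output and O(n) cost.

-- ===== PORT A =====
-- one iteration of A's loop: if merged nonempty and its last color equals this color,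
-- replace merged[-1]; otherwise append (color, start, end)
def pvStepA (merged : List (String × Int × Int)) (seg : String × Int × Int) : List (String × Int × Int) :=
  match seg with
  | (color, s, e) =>
    match merged.getLast? with
    | some last =>
      if last.1 == color then merged.dropLast ++ [(color, last.2.1, e)]
      else merged ++ [(color, s, e)]
    | none => merged ++ [(color, s, e)]

def merge_consecutive_segments (segments : List (String × Int × Int)) : List (String × Int × Int) :=
  segments.foldl pvStepA []

-- ===== PORT B =====
-- B's stack is segments[::-1] popped from the END, i.e. the original list consumed from
-- the FRONT: the stack is represented as that list with its top at the head (exact).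
-- inner while loop: pop while the stack's top has the same color, tracking `end`;
-- returns the final `end` and the remaining stack
def pvPopRun (color : String) (e : Int) : List (String × Int × Int) → Int × List (String × Int × Int)
  | [] => (e, [])
  | x :: t => if x.1 == color then pvPopRun color x.2.2 t else (e, x :: t)

-- remaining stack never grows (termination of the outer loop)
theorem pvPopRun_len (color : String) (e : Int) (l : List (String × Int × Int)) :
    (pvPopRun color e l).2.length ≤ l.length := by
  induction l generalizing e with
  | nil => simp [pvPopRun]
  | cons x t ih =>
    simp only [pvPopRun]
    split
    · exact Nat.le_succ_of_le (ih _)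
    · simp

-- outer while loop: pop one segment, pop its run, append the merged tuple
def pvOuterB : List (String × Int × Int) → List (String × Int × Int)
  | [] => []
  | (c, s, e) :: t =>
    (c, s, (pvPopRun c e t).1) :: pvOuterB (pvPopRun c e t).2
termination_by l => l.length
decreasing_by
  exact Nat.lt_succ_of_le (pvPopRun_len c e t)

def merge_consecutive_segments_alt (segments : List (String × Int × Int)) : List (String × Int × Int) :=
  pvOuterB segments

-- ===== PRECONDITION & SPEC =====
def Spec_merge_consecutive_segments (segments : List (String × Int × Int)) (out : List (String × Int × Int)) : Prop := out = merge_consecutive_segments_alt segments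
instance (segments : List (String × Int × Int)) (out : List (String × Int × Int)) : Decidable (Spec_merge_consecutive_segments segments out) := by unfold Spec_merge_consecutive_segments; infer_instance

-- ===== CLAIM (what is proved, stated in full; the proofs are below) =====
def Claim_equal_merge_consecutive_segments : Prop := ∀ (segments : List (String × Int × Int)), Dom_merge_consecutive_segments segments → Spec_merge_consecutive_segments segments (merge_consecutive_segments segments)

-- ===== LEMMAS AND PROOFS =====

-- characterisation of A's result with the current run held abstractly:
-- B-style "rest of the fold given the pending run (color, s, e)"
def pvRunA (color : String) (s e : Int) : List (String × Int × Int) → List (String × Int × Int)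
  | [] => [(color, s, e)]
  | (c, s', e') :: rest =>
    if c == color then pvRunA color s e' rest
    else (color, s, e) :: pvRunA c s' e' rest

-- loop invariant for A: folding A's step over `rest` starting from `acc ++ [pending run]`
-- yields `acc` followed by the abstract processing of the pending run against `rest`
theorem pv_foldl_run (rest : List (String × Int × Int)) :
    ∀ (acc : List (String × Int × Int)) (color : String) (s e : Int),
      List.foldl pvStepA (acc ++ [(color, s, e)]) rest = acc ++ pvRunA color s e rest := by
  induction rest with
  | nil => intro acc color s e; simp [pvRunA]
  | cons hd tl ih =>
    intro acc color s e
    obtain ⟨c, s', e'⟩ := hd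
    simp only [List.foldl_cons, pvStepA, List.getLast?_append, List.getLast?_singleton,
      Option.some_or, pvRunA]
    by_cases h : color = c
    · subst h
      simp only [BEq.rfl, if_true, List.dropLast_concat]
      exact ih acc color s e'
    · have h1 : (color == c) = false := by simp [h]
      have h2 : (c == color) = false := by simp [Ne.symm h]
      simp only [h1, h2, Bool.false_eq_true, if_false, List.append_assoc, List.singleton_append]
      have := ih (acc ++ [(color, s, e)]) c s' e'
      simpa using this

-- the abstract pending-run processing is exactly B's pop-a-run-then-recurse loop
theorem pvRunA_eq_outer (tl : List (String × Int × Int)) :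
    ∀ (c : String) (s e : Int),
      pvRunA c s e tl = (c, s, (pvPopRun c e tl).1) :: pvOuterB (pvPopRun c e tl).2 := by
  induction tl with
  | nil => intro c s e; simp [pvRunA, pvPopRun, pvOuterB]
  | cons hd rest ih =>
    intro c s e
    obtain ⟨c', s', e'⟩ := hd
    by_cases h : c' = c
    · subst h
      simp only [pvRunA, BEq.rfl, if_true, pvPopRun]
      exact ih c' s e'
    · have h1 : (c' == c) = false := by simp [h]
      simp only [pvRunA, pvPopRun, h1, Bool.false_eq_true, if_false]
      rw [ih c' s' e']
      simp [pvOuterB]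

-- ===== VERDICT (by name: the statement is the Claim_ definition above) =====
theorem merge_consecutive_segments_spec : Claim_equal_merge_consecutive_segments := by
  intro segments _
  unfold Spec_merge_consecutive_segments merge_consecutive_segments merge_consecutive_segments_alt
  match segments with
  | [] => simp [pvOuterB]
  | (color, s, e) :: rest =>
    have h1 := pv_foldl_run rest [] color s e
    have h2 := pvRunA_eq_outer rest color s e
    simp only [List.foldl_cons] at *
    calc List.foldl pvStepA (pvStepA [] (color, s, e)) rest
        = List.foldl pvStepA ([] ++ [(color, s, e)]) rest := by simp [pvStepA]
      _ = pvRunA color s e rest := by simpa using h1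
      _ = (color, s, (pvPopRun color e rest).1) :: pvOuterB (pvPopRun color e rest).2 := h2
      _ = pvOuterB ((color, s, e) :: rest) := by rw [pvOuterB]
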